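-- pv_equiv track=rewrite | github.com/Siris-Li/Oh-my--paper | skills/literature-pdf-ocr-library/scripts/generate_review_template.py | _derive_counts
-- ===== SOURCE A (Python) =====
-- from typing import Dict, List, Optional, Tuple
--
-- BUCKET_ORDER = ("arxiv", "acm", "ieee", "other")
--
-- def _derive_counts(records: List[Dict]) -> Dict[str, int]:
--     counts: Dict[str, int] = {b: 0 for b in BUCKET_ORDER}
--     for rec in records:
--         b = (rec.get("bucket") or "other").lower()
--         if b not in counts:
--             counts[b] = 0
--         counts[b] += 1
--     return counts
-- ===== SOURCE B (Python) =====
-- BUCKET_ORDER = ("arxiv", "acm", "ieee", "other")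
--
-- def _derive_counts(records):
--     norm = [(rec.get("bucket") or "other").lower() for rec in records]
--     order = list(BUCKET_ORDER) + [b for b in dict.fromkeys(norm) if b not in BUCKET_ORDER]
--     return {b: norm.count(b) for b in order}
-- ===== Notes on version B (the rewrite author's own statement) =====
-- stated objective: simpler
-- what changed: Replaces A's single mutate-in-place loop (seeded dict, membership guard, increment) with a normalize-then-count decomposition: map records to normalized bucket names, build the key order as defaults plus first-appearance extras via dict.fromkeys, and tally with list.count.
import Mathlib
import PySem

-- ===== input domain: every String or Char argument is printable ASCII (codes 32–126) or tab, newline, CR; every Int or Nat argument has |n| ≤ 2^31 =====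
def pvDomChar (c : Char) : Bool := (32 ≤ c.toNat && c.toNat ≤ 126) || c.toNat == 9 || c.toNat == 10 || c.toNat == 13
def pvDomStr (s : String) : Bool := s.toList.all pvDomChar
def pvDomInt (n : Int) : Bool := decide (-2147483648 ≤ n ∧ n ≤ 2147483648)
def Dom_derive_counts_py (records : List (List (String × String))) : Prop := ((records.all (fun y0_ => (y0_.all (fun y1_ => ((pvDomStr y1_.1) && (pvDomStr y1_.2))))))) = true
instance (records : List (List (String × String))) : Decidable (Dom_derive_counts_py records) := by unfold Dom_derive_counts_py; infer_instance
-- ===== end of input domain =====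

-- B replaces A's seeded mutate-in-place counting loop with a normalize → count → merge
-- decomposition (simpler); both return the same dict with the same key order.

-- shared module constant BUCKET_ORDER and the shared normalization expression
-- `(rec.get("bucket") or "other").lower()` that both Pythons contain verbatim
def pvBucketOrder : List String := ["arxiv", "acm", "ieee", "other"]

def pvNorm (rec : List (String × String)) : String :=
  PySem.Str.lower (match (PySem.Dict.mk rec).get? "bucket" with
    | none => "other"
    | some s => if s = "" then "other" else s)

-- ===== PORT A =====
-- counts = {b: 0 for b in BUCKET_ORDER}
def pvCounts0 : PySem.Dict String Int :=
  pvBucketOrder.foldl (fun d b => d.insert b 0) PySem.Dict.empty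

def derive_counts_py (records : List (List (String × String))) : List (String × Int) :=
  let counts := records.foldl (fun counts rec =>
    let b := pvNorm rec
    let counts := if counts.contains b then counts else counts.insert b 0
    counts.insert b (counts.getD b 0 + 1)) pvCounts0
  counts.items

-- ===== PORT B =====
def derive_counts_py_alt (records : List (List (String × String))) : List (String × Int) :=
  let norm := records.map (fun rec => pvNorm rec)
  let order := pvBucketOrder ++
    (PySem.List.dedup norm).filter (fun b => !(PySem.Set.contains pvBucketOrder b))
  order.map (fun b => (b, (norm.count b : Int)))

-- ===== PRECONDITION & SPEC =====
def Spec_derive_counts_py (records : List (List (String × String))) (out : List (String × Int)) : Prop := out = derive_counts_py_alt records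
instance (records : List (List (String × String))) (out : List (String × Int)) : Decidable (Spec_derive_counts_py records out) := by unfold Spec_derive_counts_py; infer_instance

-- ===== CLAIM (what is proved, stated in full; the proofs are below) =====
def Claim_equal_derive_counts_py : Prop := ∀ (records : List (List (String × String))), Dom_derive_counts_py records → Spec_derive_counts_py records (derive_counts_py records)

-- ===== LEMMAS AND PROOFS =====

theorem pvCounts0_mk : pvCounts0 = PySem.Dict.mk [("arxiv", 0), ("acm", 0), ("ieee", 0), ("other", 0)] := by
  decide

theorem pvCounts0_getD (k : String) : pvCounts0.getD k 0 = 0 := by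
  simp [pvCounts0_mk, PySem.Dict.getD_eq_get?_getD, PySem.Dict.get?_mk_cons]
  split_ifs <;> rfl

theorem pvCounts0_keys : pvCounts0.keys = pvBucketOrder := by decide

theorem pvCounts0_keys_nodup : pvCounts0.keys.Nodup := by decide

-- A's loop body equals a plain counting insert
theorem pvStep_eq (d : PySem.Dict String Int) (b : String) :
    (let d' := if d.contains b then d else d.insert b 0
     d'.insert b (d'.getD b 0 + 1)) = d.insert b (d.getD b 0 + 1) := by
  by_cases h : d.contains b = true
  · simp [h]
  · simp only [Bool.not_eq_true] at h
    simp [h, PySem.Dict.insert_insert_self, PySem.Dict.getD_insert_self,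
      PySem.Dict.getD_of_not_contains _ _ h]

theorem derive_counts_py_spec : Claim_equal_derive_counts_py := by
  intro records _
  unfold Spec_derive_counts_py derive_counts_py derive_counts_py_alt
  -- name the normalized bucket list
  set norm : List String := records.map (fun rec => pvNorm rec) with hnorm
  -- rewrite A's loop into a counting fold over norm
  have hfold :
      records.foldl (fun counts rec =>
          let b := pvNorm rec
          let counts := if counts.contains b then counts else counts.insert b 0
          counts.insert b (counts.getD b 0 + 1)) pvCounts0
        = norm.foldl (fun d b => d.insert b (d.getD b 0 + 1)) pvCounts0 := by
    rw [hnorm, List.foldl_map]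
    exact List.foldl_ext _ _ _ (fun d rec _ => pvStep_eq d (pvNorm rec))
  rw [hfold]
  have hnd : (norm.foldl (fun d b => d.insert b (d.getD b 0 + 1)) pvCounts0).keys.Nodup :=
    PySem.Dict.nodup_keys_foldl_insert norm _ pvCounts0 pvCounts0_keys_nodup
  rw [PySem.Dict.items_eq_map_keys _ hnd 0,
    PySem.Dict.keys_foldl_insert, pvCounts0_keys,
    PySem.Set.update_eq_append_filter, ← PySem.List.dedup_eq_ofList]
  apply List.map_congr_left
  intro k _
  rw [PySem.Dict.getD_foldl_insert_add_one, pvCounts0_getD]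
  simp

-- ===== VERDICT (by name: the statement is the Claim_ definition above) =====
-- (verdict theorem above doubles as the proof; restated here per layout)
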